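-- pv_equiv track=rewrite | github.com/ChurikovSV/Python | Lesson_04/Lesson_25.py | count_symbs
-- ===== SOURCE A (Python) =====
-- def count_symbs(symbs):
--     new_symbs = []
--     for i in range(len(symbs)):
--         n = symbs[:i + 1].count(symbs[i]) - 1
--         if n == 0:
--             new_symbs.append(symbs[i])
--         else:
--             new_symbs.append(f"{symbs[i]}_{n}")
--
--     return new_symbs
-- ===== SOURCE B (Python) =====
-- def count_symbs(symbs):
--     positions = {}
--     for i, x in enumerate(symbs):
--         positions.setdefault(x, []).append(i)
--     result = [None] * len(symbs)
--     for x, idxs in positions.items():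
--         for n, i in enumerate(idxs):
--             result[i] = x if n == 0 else f"{x}_{n}"
--     return result
-- ===== Notes on version B (the rewrite author's own statement) =====
-- stated objective: faster
-- what changed: Instead of A's single sequential scan that recounts each prefix slice, B first groups the positions of each character into a dict of index lists, then fills a preallocated result out of order, group by group, tagging the n-th position of each group with n.
import Mathlib
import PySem

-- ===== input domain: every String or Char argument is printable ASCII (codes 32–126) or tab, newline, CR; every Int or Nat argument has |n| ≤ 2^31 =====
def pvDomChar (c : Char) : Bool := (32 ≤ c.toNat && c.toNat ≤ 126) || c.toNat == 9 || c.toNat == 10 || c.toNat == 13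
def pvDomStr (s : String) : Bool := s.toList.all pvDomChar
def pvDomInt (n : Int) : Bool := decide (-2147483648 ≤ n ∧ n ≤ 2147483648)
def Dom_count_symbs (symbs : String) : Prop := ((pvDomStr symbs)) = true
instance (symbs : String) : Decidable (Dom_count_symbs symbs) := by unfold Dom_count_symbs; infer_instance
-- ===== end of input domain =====

-- B replaces A's index-by-index prefix recount with two staged passes: group the
-- positions of each character in a dict, then fill a preallocated result out of
-- order, group by group (objective: faster).

-- ===== PORT A =====
-- for i in range(len(symbs)): n = symbs[:i+1].count(symbs[i]) - 1; append symbs[i] or f"{symbs[i]}_{n}"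
-- (str.count of the single-character string symbs[i] is the count of that character in the slice;
--  f"{c}_{n}" is built from the char, '_', and str(n) = PySem.Int.toChars n)
def count_symbs (symbs : String) : List String :=
  let cs := symbs.toList
  (PySem.List.pyRange 0 (cs.length : Int) 1).foldl
    (fun new_symbs i =>
      let c := PySem.List.pyGetD cs i ' '
      let n : Int := ((PySem.List.slice cs none (some (i + 1))).count c : Int) - 1
      if n = 0 then new_symbs ++ [String.ofList [c]]
      else new_symbs ++ [String.ofList ([c] ++ '_' :: PySem.Int.toChars n)]) []

-- ===== PORT B =====
-- pass 1: positions.setdefault(x, []).append(i) over enumerate(symbs)  (= d[x] = d.get(x, []) + [i]);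
-- enumerate pairs are carried as List.zipIdx, whose pair order is (value, index)
-- pass 2: result = [None]*len(symbs) (placeholders modeled as ""; every slot is written),
--         then for x, idxs in positions.items(): for n, i in enumerate(idxs): result[i] = x or f"{x}_{n}"
def count_symbs_alt (symbs : String) : List String :=
  let cs := symbs.toList
  let positions := cs.zipIdx.foldl
    (fun (d : PySem.Dict Char (List Nat)) p => d.modify p.1 [] (fun l => l ++ [p.2]))
    PySem.Dict.empty
  let result := List.replicate cs.length ""
  positions.items.foldl
    (fun res g =>
      g.2.zipIdx.foldl
        (fun r q =>
          r.set q.1 (if q.2 = 0 then String.ofList [g.1]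
                     else String.ofList (g.1 :: '_' :: PySem.Int.toChars (q.2 : Int))))
        res)
    result

-- ===== PRECONDITION & SPEC =====
def Spec_count_symbs (symbs : String) (out : List String) : Prop := out = count_symbs_alt symbs
instance (symbs : String) (out : List String) : Decidable (Spec_count_symbs symbs out) := by unfold Spec_count_symbs; infer_instance

-- ===== CLAIM =====
def Claim_equal_count_symbs : Prop := ∀ (symbs : String), Dom_count_symbs symbs → Spec_count_symbs symbs (count_symbs symbs)

-- ===== LEMMAS AND PROOFS =====
def occ (cs : List Char) (c : Char) : List Nat :=
  (cs.zipIdx.filter (fun q => q.1 == c)).map Prod.snd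

lemma occ_length (cs : List Char) (c : Char) : (occ cs c).length = cs.count c := by
  have h := List.countP_map (p := fun x => x == c) (f := (Prod.fst : Char × Nat → Char)) (l := cs.zipIdx)
  rw [List.zipIdx_map_fst 0 cs] at h
  simp only [occ, List.length_map]
  rw [← List.countP_eq_length_filter, List.count, h]
  rfl

lemma mem_occ (cs : List Char) (c : Char) (j : Nat) : j ∈ occ cs c ↔ cs[j]? = some c := by
  simp only [occ, List.mem_map, List.mem_filter]
  constructor
  · rintro ⟨⟨c', j'⟩, ⟨hmem, hp⟩, rfl⟩
    have : c' = c := by simpa using hp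
    subst this
    exact List.mk_mem_zipIdx_iff_getElem?.mp hmem
  · intro h
    exact ⟨(c, j), ⟨List.mk_mem_zipIdx_iff_getElem?.mpr h, by simp⟩, rfl⟩

lemma occ_nodup (cs : List Char) (c : Char) : (occ cs c).Nodup := by
  have h1 : (cs.zipIdx.filter (fun q => q.1 == c)).Sublist cs.zipIdx := List.filter_sublist
  have h2 := h1.map Prod.snd
  have h3 : (cs.zipIdx.map Prod.snd).Nodup := by
    have he : cs.zipIdx.map Prod.snd = List.range cs.length := by
      simp [List.zipIdx_eq_zip_range', List.map_snd_zip, List.range_eq_range']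
    rw [he]; exact List.nodup_range
  exact h2.nodup h3

lemma occ_append_singleton (cs : List Char) (d c : Char) :
    occ (cs ++ [d]) c = occ cs c ++ (if d = c then [cs.length] else []) := by
  by_cases hd : d = c <;>
    simp [occ, List.zipIdx_append, List.filter_append, hd]

lemma occ_getElem (cs : List Char) : ∀ (c : Char) (j : Nat), j < cs.length → cs.getD j ' ' = c →
    (occ cs c)[(cs.take j).count c]? = some j := by
  induction cs using List.reverseRecOn with
  | nil => intro c j hj; simp at hj
  | append_singleton cs d ih =>
    intro c j hj hc
    rcases Nat.lt_or_ge j cs.length with h | h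
    · have hgd : cs.getD j ' ' = c := by
        rw [← hc]; exact (List.getD_append cs [d] ' ' j h).symm
      have htake : (cs ++ [d]).take j = cs.take j :=
        List.take_append_of_le_length (Nat.le_of_lt h)
      have hih := ih c j h hgd
      rw [occ_append_singleton, htake,
        List.getElem?_append_left (List.getElem?_eq_some_iff.mp hih).1]
      exact hih
    · have hjeq : j = cs.length := by
        simp only [List.length_append, List.length_cons, List.length_nil] at hj; omega
      subst hjeq
      have hd : d = c := by
        rw [← hc]; simp [List.getD]
      subst hd
      have htake : (cs ++ [d]).take cs.length = cs := by
        simp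
      rw [occ_append_singleton, htake, if_pos rfl,
        List.getElem?_append_right (by rw [occ_length])]
      rw [occ_length]
      simp

def mkS (c : Char) (m : Nat) : String :=
  if m = 0 then String.ofList [c] else String.ofList (c :: '_' :: PySem.Int.toChars (m : Int))

def stepS (cs : List Char) (j : Nat) : String :=
  mkS (cs.getD j ' ') ((cs.take j).count (cs.getD j ' '))

-- the common target: the result list described position by position
def tgt (cs : List Char) : List String := (List.range cs.length).map (stepS cs)

def setw (r : List String) (w : Nat × String) : List String := r.set w.1 w.2

lemma len_foldl_setw (ws : List (Nat × String)) : ∀ r, (ws.foldl setw r).length = r.length := by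
  induction ws with
  | nil => intro r; rfl
  | cons w ws ih => intro r; rw [List.foldl_cons, ih]; simp [setw]

lemma untouched_foldl_setw (ws : List (Nat × String)) :
    ∀ r (j : Nat), j ∉ ws.map Prod.fst → (ws.foldl setw r)[j]? = r[j]? := by
  induction ws with
  | nil => intro r j _; rfl
  | cons w ws ih =>
      intro r j hj
      simp only [List.map_cons, List.mem_cons, not_or] at hj
      rw [List.foldl_cons, ih _ j hj.2, setw, List.getElem?_set_ne (fun h => hj.1 h.symm)]

lemma touch_foldl_setw (ws : List (Nat × String)) :
    ∀ r (j : Nat) (v : String), j < r.length → (ws.map Prod.fst).count j = 1 →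
      (j, v) ∈ ws → (ws.foldl setw r)[j]? = some v := by
  induction ws with
  | nil => intro r j v _ _ h; simp at h
  | cons w ws ih =>
      intro r j v hlen hcnt hmem
      rw [List.foldl_cons]
      by_cases hw : w.1 = j
      · have hrest : j ∉ ws.map Prod.fst := by
          intro hmem'
          have h1 : 1 ≤ (ws.map Prod.fst).count j := List.one_le_count_iff.mpr hmem'
          have h2 : (ws.map Prod.fst).count j + 1 = 1 := by
            simpa [List.count_cons, hw] using hcnt
          omega
        have hv : w = (j, v) := by
          rcases List.mem_cons.mp hmem with h | h
          · exact h.symm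
          · exact absurd (List.mem_map.mpr ⟨(j, v), h, rfl⟩) hrest
        subst hv
        rw [untouched_foldl_setw ws _ j hrest]
        simp only [setw]
        exact List.getElem?_set_self hlen
      · have hmem' : (j, v) ∈ ws := by
          rcases List.mem_cons.mp hmem with h | h
          · exact absurd (congrArg Prod.fst h).symm hw
          · exact h
        have hcnt' : (ws.map Prod.fst).count j = 1 := by
          simpa [List.count_cons, hw] using hcnt
        exact ih _ j v (by simpa [setw] using hlen) hcnt' hmem'

lemma map_fst_writes (cs : List Char) (K : List Char) :
    ((K.map (fun k => (k, occ cs k))).flatMap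
      (fun g => g.2.zipIdx.map (fun q => (q.1, mkS g.1 q.2)))).map Prod.fst
    = K.flatMap (occ cs) := by
  induction K with
  | nil => rfl
  | cons k K ih =>
      simp only [List.map_cons, List.flatMap_cons, List.map_append, ih, List.map_map]
      congr 1
      have hf : (Prod.fst ∘ fun q : Nat × Nat => (q.1, mkS k q.2)) = Prod.fst := rfl
      rw [hf]
      exact List.zipIdx_map_fst 0 (occ cs k)

lemma A_loop (cs : List Char) : ∀ (pre : List Char) (acc : List String),
    (PySem.List.pyRange (pre.length : Int) ((pre.length : Int) + (cs.length : Int)) 1).foldl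
      (fun new_symbs i =>
        let c := PySem.List.pyGetD (pre ++ cs) i ' '
        let n : Int := ((PySem.List.slice (pre ++ cs) none (some (i + 1))).count c : Int) - 1
        if n = 0 then new_symbs ++ [String.ofList [c]]
        else new_symbs ++ [String.ofList ([c] ++ '_' :: PySem.Int.toChars n)]) acc
    = acc ++ (List.range cs.length).map (fun j => stepS (pre ++ cs) (pre.length + j)) := by
  induction cs with
  | nil =>
      intro pre acc
      rw [PySem.List.pyRange_one_eq_nil (by simp)]
      simp
  | cons c cs ih =>
      intro pre acc
      rw [PySem.List.pyRange_one_cons (by push_cast [List.length_cons]; omega)]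
      rw [List.foldl_cons]
      have hget : PySem.List.pyGetD (pre ++ c :: cs) (pre.length : Int) ' ' = c := by
        simp [PySem.List.pyGetD_natCast, List.getD]
      have hslice : PySem.List.slice (pre ++ c :: cs) none (some ((pre.length : Int) + 1)) = pre ++ [c] := by
        have h1 : ((pre.length : Int) + 1) = ((pre.length + 1 : Nat) : Int) := by push_cast; ring
        rw [h1, PySem.List.slice_to_natCast]
        simp [List.take_append]
      have hcount : (((pre ++ [c]).count c : Int)) - 1 = (pre.count c : Int) := by
        simp [List.count_append]
      have hgd : (pre ++ c :: cs).getD pre.length ' ' = c := by simp [List.getD]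
      have htk : (pre ++ c :: cs).take pre.length = pre :=
        List.take_append_of_le_length (le_refl _) |>.trans (List.take_length)
      have hstep : (if ((pre.count c : Int)) = 0 then acc ++ [String.ofList [c]]
           else acc ++ [String.ofList ([c] ++ '_' :: PySem.Int.toChars (pre.count c : Int))])
         = acc ++ [stepS (pre ++ c :: cs) (pre.length + 0)] := by
        simp only [Nat.add_zero, stepS, mkS, hgd, htk, Int.natCast_eq_zero]
        split_ifs <;> rfl
      simp only [hget, hslice, hcount, hstep]
      have hassoc : pre ++ c :: cs = (pre ++ [c]) ++ cs := by simp
      have hb1 : (pre.length : Int) + 1 = (((pre ++ [c]).length : Nat) : Int) := by simp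
      have hb2 : (pre.length : Int) + ((c :: cs).length : Int) = (((pre ++ [c]).length : Nat) : Int) + (cs.length : Int) := by
        push_cast [List.length_cons]; simp; ring
      rw [hb2, hassoc, hb1]
      rw [ih (pre ++ [c]) (acc ++ [stepS ((pre ++ [c]) ++ cs) (pre.length + 0)])]
      rw [List.append_assoc]
      congr 1
      rw [List.length_cons, List.range_succ_eq_map, List.map_cons, List.map_map,
        List.singleton_append]
      congr 1
      apply List.map_congr_left
      intro a _
      simp only [Function.comp_apply, Nat.succ_eq_add_one]
      congr 1
      simp only [List.length_append, List.length_cons, List.length_nil]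
      omega

lemma B_flatten (items : List (Char × List Nat)) : ∀ (r0 : List String),
    items.foldl
      (fun res g =>
        g.2.zipIdx.foldl
          (fun r q =>
            r.set q.1 (if q.2 = 0 then String.ofList [g.1]
                       else String.ofList (g.1 :: '_' :: PySem.Int.toChars (q.2 : Int))))
          res)
      r0
    = (items.flatMap (fun g => g.2.zipIdx.map (fun q => (q.1, mkS g.1 q.2)))).foldl setw r0 := by
  induction items with
  | nil => intro r0; rfl
  | cons g items ih =>
      intro r0
      rw [List.foldl_cons, List.flatMap_cons, List.foldl_append, ← ih]
      congr 1
      rw [List.foldl_map]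
      rfl


lemma count_flatMap_occ (cs : List Char) (j : Nat) (c : Char) (hjc : cs[j]? = some c) :
    ∀ K : List Char, K.Nodup → c ∈ K → (K.flatMap (occ cs)).count j = 1 := by
  intro K
  induction K with
  | nil => intro _ h; simp at h
  | cons k K ih =>
    intro hnd hc
    rw [List.flatMap_cons, List.count_append]
    by_cases hk : k = c
    · subst hk
      have h1 : (occ cs k).count j = 1 :=
        List.count_eq_one_of_mem (occ_nodup cs k) ((mem_occ cs k j).mpr hjc)
      have h0 : (K.flatMap (occ cs)).count j = 0 := by
        rw [List.count_eq_zero]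
        intro hmem
        rcases List.mem_flatMap.mp hmem with ⟨k', hk', hj'⟩
        have hk'c : k' = k := by
          have h := (mem_occ cs k' j).mp hj'
          rw [hjc] at h
          exact (Option.some_inj.mp h).symm
        exact (List.nodup_cons.mp hnd).1 (hk'c ▸ hk')
      omega
    · have h0 : (occ cs k).count j = 0 := by
        rw [List.count_eq_zero]
        intro hmem
        have h := (mem_occ cs k j).mp hmem
        rw [hjc] at h
        exact hk (Option.some_inj.mp h).symm
      have hc' : c ∈ K := by
        rcases List.mem_cons.mp hc with h | h
        · exact absurd h.symm hk
        · exact h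
      rw [h0, ih (List.nodup_cons.mp hnd).2 hc']

lemma A_eq_tgt (symbs : String) : count_symbs symbs = tgt symbs.toList := by
  have h := A_loop symbs.toList [] []
  simp only [List.nil_append, List.length_nil, Nat.cast_zero, zero_add] at h
  unfold count_symbs tgt
  rw [h]

lemma B_eq_tgt (symbs : String) : count_symbs_alt symbs = tgt symbs.toList := by
  unfold count_symbs_alt
  rw [B_flatten]
  set cs := symbs.toList with hcs
  set positions := cs.zipIdx.foldl
    (fun (d : PySem.Dict Char (List Nat)) p => d.modify p.1 [] (fun l => l ++ [p.2]))
    PySem.Dict.empty with hpos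
  have hkeys : positions.keys = PySem.Set.ofList cs := by
    rw [hpos, PySem.Dict.keys_foldl_modify_key]
    simp [PySem.Set.update_nil_left, List.zipIdx_map_fst]
  have hnd : positions.keys.Nodup := by
    rw [hkeys]; exact PySem.Set.nodup_ofList cs
  have hgetD : ∀ c, positions.getD c [] = occ cs c := by
    intro c
    rw [hpos, PySem.Dict.getD_foldl_modify_append]
    simp [occ, PySem.Dict.getD_empty]
  have hitems : positions.items = (PySem.Set.ofList cs).map (fun k => (k, occ cs k)) := by
    rw [PySem.Dict.items_eq_map_keys positions hnd [], hkeys]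
    exact List.map_congr_left (fun k _ => by rw [hgetD])
  rw [hitems]
  apply List.ext_getElem?
  intro j
  have hlen : ((((PySem.Set.ofList cs).map fun k => (k, occ cs k)).flatMap
      (fun g => g.2.zipIdx.map (fun q => (q.1, mkS g.1 q.2)))).foldl setw
      (List.replicate cs.length "")).length = cs.length := by
    rw [len_foldl_setw, List.length_replicate]
  by_cases hj : j < cs.length
  · -- the position is written exactly once, with the target value
    have hjc : cs[j]? = some (cs.getD j ' ') := by
      rw [List.getD_eq_getElem?_getD, List.getElem?_eq_getElem hj]
      rfl
    set c := cs.getD j ' ' with hcdef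
    have hcK : c ∈ PySem.Set.ofList cs := by
      have hm : c ∈ cs := List.mem_of_getElem? hjc
      simpa [PySem.Set.mem_ofList] using hm
    have hcnt : ((((PySem.Set.ofList cs).map fun k => (k, occ cs k)).flatMap
        (fun g => g.2.zipIdx.map (fun q => (q.1, mkS g.1 q.2)))).map Prod.fst).count j = 1 := by
      rw [map_fst_writes]
      exact count_flatMap_occ cs j c hjc (PySem.Set.ofList cs) (PySem.Set.nodup_ofList cs) hcK
    have hmem : (j, stepS cs j) ∈ ((PySem.Set.ofList cs).map fun k => (k, occ cs k)).flatMap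
        (fun g => g.2.zipIdx.map (fun q => (q.1, mkS g.1 q.2))) := by
      apply List.mem_flatMap.mpr
      refine ⟨(c, occ cs c), List.mem_map.mpr ⟨c, hcK, rfl⟩, ?_⟩
      apply List.mem_map.mpr
      refine ⟨(j, (cs.take j).count c), ?_, rfl⟩
      exact List.mk_mem_zipIdx_iff_getElem?.mpr (occ_getElem cs c j hj rfl)
    rw [touch_foldl_setw _ _ j (stepS cs j) (by rw [List.length_replicate]; exact hj) hcnt hmem]
    rw [tgt, List.getElem?_map, List.getElem?_range hj]
    rfl
  · rw [List.getElem?_eq_none (by rw [hlen]; omega),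
      List.getElem?_eq_none (by rw [tgt]; simp; omega)]

-- ===== VERDICT =====
theorem count_symbs_spec : Claim_equal_count_symbs := by
  intro symbs _
  unfold Spec_count_symbs
  rw [A_eq_tgt, B_eq_tgt]
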